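-- pv_equiv track=rewrite | github.com/michael-schwanninger/5AHWII_SCHWANNINGER_SWP | poker/game.py | poker_hands
-- ===== SOURCE A (Python) =====
-- def getColor(card):
--     return card // 13
--
-- def getValue(card):
--     return card % 13
--
-- def poker_hands(cards):
--     cards.sort()
--
--     # - Flush - 5 of the same color
--     colors = [getColor(card) for card in cards]
--     colors.sort()
--     flush = colors[0] == colors[4]
--
--     # set -> only unique items (only works with 5 cards drawn)
--     #flush = len(set(colors)) == 1
--
--     # - Straight - 5 consecutive numbers
--     values = [getValue(card) for card in cards]
--     values.sort()
--     straight = True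
--     for i in range(0, 4):
--         if values[i] != values[i + 1] - 1:
--             straight = False
--
--     # - n_of_a_Kind
--     value_counter = [0] * 13
--     for card in cards:
--         value_counter[getValue(card)] += 1
--
--     four_of_a_kind = 4 in value_counter
--     three_of_a_kind = 3 in value_counter
--     two_pair = value_counter.count(2) == 2  # checks if there are two pairs
--     pair = 2 in value_counter
--
--     if flush and straight and cards[0] == 8:
--         return "royal_flush"
--     elif flush and straight:
--         return "straight_flush"
--     elif four_of_a_kind:
--         return "four_of_a_kind"
--     elif three_of_a_kind and pair:
--         return "full_house"
--     elif flush: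
--         return "flush"
--     elif straight:
--         return "straight"
--     elif three_of_a_kind:
--         return "three_of_a_kind"
--     elif two_pair:
--         return "two_pair"
--     elif pair:
--         return "pair"
--     else:
--         return "highest_card"
-- ===== SOURCE B (Python) =====
-- def poker_hands(cards):
--     values = [card % 13 for card in cards]
--     colors = [card // 13 for card in cards]
--     # count value-equal unordered pairs among the five cards; this single number
--     # determines the n-of-a-kind category: 6->four, 4->full house, 3->three, 2->two pair, 1->pair
--     p = 0
--     for i in range(5):
--         for j in range(i + 1, 5):
--             if values[i] == values[j]:
--                 p += 1
--     flush = min(colors) == max(colors)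
--     straight = p == 0 and max(values) - min(values) == 4
--     if flush and straight:
--         return "royal_flush" if min(cards) == 8 else "straight_flush"
--     if p == 6:
--         return "four_of_a_kind"
--     if p == 4:
--         return "full_house"
--     if flush:
--         return "flush"
--     if straight:
--         return "straight"
--     names = {3: "three_of_a_kind", 2: "two_pair", 1: "pair"}
--     return names.get(p, "highest_card")
-- ===== Notes on version B (the rewrite author's own statement) =====
-- stated objective: alternative
-- what changed: B never sorts and never builds a per-rank counter: it counts the value-equal unordered pairs among the five cards (a single number 6/4/3/2/1/0 that classifies every n-of-a-kind shape), tests flush as min(colors)==max(colors), straight as zero equal pairs plus span 4, and uses min(cards) for the royal test; A sorts cards in place, B does not mutate its argument (the claim is about the return value).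
-- outside the precondition, e.g. on poker_hands([0, 1, 2, 3, 4, 5]): A returns 'straight_flush', B returns 'flush'
import Mathlib
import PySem

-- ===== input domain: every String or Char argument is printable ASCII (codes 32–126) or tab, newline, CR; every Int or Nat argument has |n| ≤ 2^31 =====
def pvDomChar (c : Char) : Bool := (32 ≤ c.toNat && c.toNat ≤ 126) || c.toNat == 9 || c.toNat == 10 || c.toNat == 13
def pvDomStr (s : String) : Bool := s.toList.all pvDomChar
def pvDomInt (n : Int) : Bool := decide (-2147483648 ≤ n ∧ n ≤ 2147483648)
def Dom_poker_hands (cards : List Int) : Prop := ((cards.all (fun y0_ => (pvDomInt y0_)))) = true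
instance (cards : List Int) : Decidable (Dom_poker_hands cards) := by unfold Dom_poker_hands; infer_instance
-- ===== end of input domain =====

-- B classifies the hand by counting the value-equal unordered pairs among the five cards instead of
-- sorting and scanning a 13-slot counter; A sorts `cards` in place, B does not mutate its argument
-- (the equivalence proved here is about the return value).

-- ===== PORT A =====
def getColor (card : Int) : Int := PySem.Int.floordiv card 13

def getValue (card : Int) : Int := PySem.Int.mod card 13

def poker_hands (cards : List Int) : String :=
  let cards := PySem.List.sorted cards (fun x => x)                 -- cards.sort()
  let colors := cards.map (fun card => getColor card)
  let colors := PySem.List.sorted colors (fun x => x)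
  -- colors[0] == colors[4]: in range under Pre_ (5 cards)
  let flush := PySem.List.pyGetD colors 0 0 == PySem.List.pyGetD colors 4 0
  let values := PySem.List.sorted (cards.map (fun card => getValue card)) (fun x => x)
  let straight := (PySem.List.pyRange 0 4 1).foldl (fun straight i =>
      if PySem.List.pyGetD values i 0 ≠ PySem.List.pyGetD values (i + 1) 0 - 1 then false
      else straight) true
  -- value_counter[getValue(card)] += 1 : getValue card = card % 13 ∈ [0,13), so .toNat is Python's exact index
  let value_counter := cards.foldl (fun vc card =>
      vc.set (getValue card).toNat (vc.getD (getValue card).toNat 0 + 1)) (List.replicate 13 (0 : Int))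
  let four_of_a_kind := value_counter.contains 4
  let three_of_a_kind := value_counter.contains 3
  let two_pair := PySem.List.count value_counter 2 == 2
  let pair := value_counter.contains 2
  if flush && straight && (PySem.List.pyGetD cards 0 0 == 8) then "royal_flush"
  else if flush && straight then "straight_flush"
  else if four_of_a_kind then "four_of_a_kind"
  else if three_of_a_kind && pair then "full_house"
  else if flush then "flush"
  else if straight then "straight"
  else if three_of_a_kind then "three_of_a_kind"
  else if two_pair then "two_pair"
  else if pair then "pair"
  else "highest_card"

-- ===== PORT B =====
def poker_hands_alt (cards : List Int) : String :=
  let values := cards.map (fun card => PySem.Int.mod card 13)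
  let colors := cards.map (fun card => PySem.Int.floordiv card 13)
  -- p = number of value-equal unordered pairs among the five cards
  let p := (PySem.List.pyRange 0 5 1).foldl (fun p i =>
      (PySem.List.pyRange (i + 1) 5 1).foldl (fun p j =>
        if PySem.List.pyGetD values i 0 == PySem.List.pyGetD values j 0 then p + 1 else p) p)
    (0 : Int)
  -- min/max of nonempty lists under Pre_ (Python raises on an empty list)
  let flush := PySem.List.min? colors (fun x => x) == PySem.List.max? colors (fun x => x)
  let straight := (p == 0) &&
    ((PySem.List.max? values (fun x => x)).getD 0 - (PySem.List.min? values (fun x => x)).getD 0 == 4)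
  if flush && straight then
    (if (PySem.List.min? cards (fun x => x)).getD 0 == 8 then "royal_flush" else "straight_flush")
  else if p == 6 then "four_of_a_kind"
  else if p == 4 then "full_house"
  else if flush then "flush"
  else if straight then "straight"
  else PySem.Dict.getD (PySem.Dict.ofList
    [((3 : Int), "three_of_a_kind"), (2, "two_pair"), (1, "pair")]) p "highest_card"

-- ===== PRECONDITION & SPEC =====
-- Pre_ restricts to 5-card hands, the function's intended domain: A raises IndexError on fewer than
-- 5 cards, and on more than 5 its value is an artefact of testing flush/straight on only the five
-- lowest cards while counting all cards.
def Pre_poker_hands (cards : List Int) : Prop := cards.length = 5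
instance (cards : List Int) : Decidable (Pre_poker_hands cards) := by unfold Pre_poker_hands; infer_instance

def pvWitness_poker_hands : List Int := [8, 9, 10, 11, 12]

def Spec_poker_hands (cards : List Int) (out : String) : Prop := out = poker_hands_alt cards
instance (cards : List Int) (out : String) : Decidable (Spec_poker_hands cards out) := by unfold Spec_poker_hands; infer_instance

-- ===== CLAIM (what is proved, stated in full; the proofs are below) =====
def Claim_equal_poker_hands : Prop := ∀ (cards : List Int), Dom_poker_hands cards → Pre_poker_hands cards → Spec_poker_hands cards (poker_hands cards)

-- ===== LEMMAS AND PROOFS =====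

theorem getValue_bounds (c : Int) : 0 ≤ getValue c ∧ getValue c < 13 :=
  ⟨PySem.Int.mod_nonneg c (by norm_num), PySem.Int.mod_lt c (by norm_num)⟩

-- the 13-slot counter fold computes occurrence counts
theorem counterA_spec (l : List Int) (acc : List Int) (hlen : acc.length = 13) :
    (l.foldl (fun vc card =>
        vc.set (getValue card).toNat (vc.getD (getValue card).toNat 0 + 1)) acc).length = 13 ∧
    ∀ j : Nat, j < 13 →
      (l.foldl (fun vc card =>
        vc.set (getValue card).toNat (vc.getD (getValue card).toNat 0 + 1)) acc).getD j 0
        = acc.getD j 0 + ((l.map getValue).count ((j : Nat) : Int) : Int) := by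
  induction l generalizing acc with
  | nil => exact ⟨hlen, fun j hj => by simp⟩
  | cons card rest ih =>
    have hb := getValue_bounds card
    have hk13 : (getValue card).toNat < 13 := by omega
    obtain ⟨ihL, ihI⟩ := ih (acc.set (getValue card).toNat
      (acc.getD (getValue card).toNat 0 + 1)) (by simp [hlen])
    refine ⟨by simpa using ihL, ?_⟩
    intro j hj
    rw [List.foldl_cons, ihI j hj]
    have hset : (acc.set (getValue card).toNat (acc.getD (getValue card).toNat 0 + 1)).getD j 0
        = if (getValue card).toNat = j then acc.getD j 0 + 1 else acc.getD j 0 := by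
      simp only [List.getD_eq_getElem?_getD, List.getElem?_set, hlen, hk13, if_true]
      split_ifs with h1
      · subst h1; simp
      · rfl
    rw [hset]
    rw [List.map_cons, List.count_cons]
    by_cases hkj : (getValue card).toNat = j
    · have : ((j : Nat) : Int) = getValue card := by omega
      simp [hkj, this]
      omega
    · have hne : getValue card ≠ ((j : Nat) : Int) := by omega
      simp [hkj, hne]

theorem value_counter_eq (l : List Int) :
    (l.foldl (fun vc card =>
        vc.set (getValue card).toNat (vc.getD (getValue card).toNat 0 + 1))
        (List.replicate 13 (0 : Int)))
      = (List.range 13).map (fun j => (((l.map getValue).count ((j : Nat) : Int) : Nat) : Int)) := by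
  obtain ⟨hL, hI⟩ := counterA_spec l (List.replicate 13 (0 : Int)) (by simp)
  apply List.ext_getElem (by rw [hL]; simp)
  intro j h1 h2
  have hj13 : j < 13 := by rwa [hL] at h1
  have hgd := hI j hj13
  rw [List.getD_eq_getElem _ _ (by rw [hL]; exact hj13)] at hgd
  have hrep : (List.replicate 13 (0 : Int)).getD j 0 = 0 := by
    rw [List.getD_eq_getElem _ _ (by simpa using hj13)]
    exact List.getElem_replicate _
  rw [hrep, zero_add] at hgd
  simp only [List.getElem_map, List.getElem_range]
  exact hgd

theorem mem_rangecount_iff (L : List Int) (hL : ∀ x ∈ L, 0 ≤ x ∧ x < 13) (k : Int) (hk : k ≠ 0) :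
    (k ∈ (List.range 13).map (fun j => ((L.count ((j : Nat) : Int) : Nat) : Int)))
      ↔ ∃ w ∈ L, ((L.count w : Nat) : Int) = k := by
  constructor
  · intro h
    obtain ⟨j, hj, hcnt⟩ := List.mem_map.mp h
    refine ⟨((j : Nat) : Int), ?_, hcnt⟩
    have hne : L.count ((j : Nat) : Int) ≠ 0 := by
      intro h0
      rw [h0] at hcnt
      exact hk (by simpa using hcnt.symm)
    exact List.count_pos_iff.mp (Nat.pos_of_ne_zero hne)
  · rintro ⟨w, hw, hcnt⟩
    obtain ⟨h0, h13⟩ := hL w hw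
    refine List.mem_map.mpr ⟨w.toNat, List.mem_range.mpr (by omega), ?_⟩
    rw [Int.toNat_of_nonneg h0]
    exact hcnt

theorem count_rangecount (L : List Int) (hL : ∀ x ∈ L, 0 ≤ x ∧ x < 13) (k : Int) (hk : k ≠ 0) :
    ((List.range 13).map (fun j => ((L.count ((j : Nat) : Int) : Nat) : Int))).count k
      = ((PySem.Set.ofList L).map (fun w => ((L.count w : Nat) : Int))).count k := by
  have hmemof : ∀ x : Int, (((L.count x : Nat) : Int) == k) = true → x ∈ L := by
    intro x hx
    rw [beq_iff_eq] at hx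
    have hne : L.count x ≠ 0 := by intro h0; rw [h0] at hx; exact hk (by simpa using hx.symm)
    exact List.count_pos_iff.mp (Nat.pos_of_ne_zero hne)
  rw [List.count_eq_countP, List.count_eq_countP]
  have hcast : List.countP (fun x => x == k)
      ((List.range 13).map (fun j => ((L.count ((j : Nat) : Int) : Nat) : Int)))
      = List.countP (fun x => ((L.count x : Nat) : Int) == k)
        ((List.range 13).map (fun j => ((j : Nat) : Int))) := by
    rw [List.countP_map, List.countP_map]
    rfl
  rw [hcast]
  have hcast2 : List.countP (fun x => x == k)
      ((PySem.Set.ofList L).map (fun w => ((L.count w : Nat) : Int)))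
      = List.countP (fun x => ((L.count x : Nat) : Int) == k) (PySem.Set.ofList L) := by
    rw [List.countP_map]; rfl
  rw [hcast2, List.countP_eq_length_filter, List.countP_eq_length_filter]
  have hn1 : (((List.range 13).map (fun j => ((j : Nat) : Int))).filter
      (fun x => ((L.count x : Nat) : Int) == k)).Nodup :=
    (List.nodup_range.map (fun a b => by omega)).filter _
  have hn2 : ((PySem.Set.ofList L).filter
      (fun x => ((L.count x : Nat) : Int) == k)).Nodup :=
    (PySem.Set.nodup_ofList L).filter _
  have hperm := (List.perm_ext_iff_of_nodup hn1 hn2).mpr (by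
    intro x
    simp only [List.mem_filter, List.mem_map, List.mem_range, PySem.Set.mem_ofList]
    constructor
    · rintro ⟨⟨j, hj, rfl⟩, hp⟩
      exact ⟨hmemof _ hp, hp⟩
    · rintro ⟨hx, hp⟩
      have := hL x (hmemof _ hp)
      exact ⟨⟨x.toNat, by omega, by omega⟩, hp⟩)
  exact hperm.length_eq

theorem sum_ofList_count (L : List Int) :
    ((PySem.Set.ofList L).map (fun w => ((L.count w : Nat) : Int))).sum = (L.length : Int) := by
  have hnd : (PySem.Set.ofList L).Nodup := PySem.Set.nodup_ofList L
  have hts : (PySem.Set.ofList L).toFinset = L.toFinset := by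
    ext a
    simp [List.mem_toFinset, PySem.Set.mem_ofList]
  rw [← List.sum_toFinset _ hnd, hts, ← Nat.cast_sum, List.sum_toFinset_count_eq_length]

theorem length_le_sum (sig : List Int) (hpos : ∀ x ∈ sig, 1 ≤ x) : (sig.length : Int) ≤ sig.sum := by
  induction sig with
  | nil => simp
  | cons a t ih =>
    have ha := hpos a (by simp)
    have := ih (fun x hx => hpos x (by simp [hx]))
    simp only [List.length_cons, List.sum_cons]
    push_cast
    omega

theorem partition5 (sig : List Int) (hsort : sig.Pairwise (fun a b => b ≤ a))
    (hpos : ∀ x ∈ sig, 1 ≤ x) (hsum : sig.sum = 5) :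
    sig = [5] ∨ sig = [4,1] ∨ sig = [3,2] ∨ sig = [3,1,1] ∨ sig = [2,2,1] ∨
    sig = [2,1,1,1] ∨ sig = [1,1,1,1,1] := by
  have hlen5 : (sig.length : Int) ≤ 5 := le_trans (length_le_sum sig hpos) (by rw [hsum])
  rcases sig with _ | ⟨a, _ | ⟨b, _ | ⟨c, _ | ⟨d, _ | ⟨e, rest⟩⟩⟩⟩⟩
  · simp at hsum
  · have ha : a = 5 := by simpa using hsum
    subst ha; tauto
  · simp only [List.pairwise_cons, List.mem_cons, List.not_mem_nil,
      List.sum_cons, List.sum_nil] at hsort hsum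
    have h1 := hpos a (by simp)
    have h2 := hpos b (by simp)
    have hba : b ≤ a := by
      have := hsort.1 b
      simp at this
      exact this
    have : a = 4 ∧ b = 1 ∨ a = 3 ∧ b = 2 := by omega
    rcases this with ⟨rfl, rfl⟩ | ⟨rfl, rfl⟩ <;> tauto
  · simp only [List.pairwise_cons, List.mem_cons, List.not_mem_nil,
      List.sum_cons, List.sum_nil] at hsort hsum
    have h1 := hpos a (by simp)
    have h2 := hpos b (by simp)
    have h3 := hpos c (by simp)
    have hba : b ≤ a := by have := hsort.1 b; simp at this; omega
    have hcb : c ≤ b := by have := hsort.2.1 c; simp at this; omega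
    have : a = 3 ∧ b = 1 ∧ c = 1 ∨ a = 2 ∧ b = 2 ∧ c = 1 := by omega
    rcases this with ⟨rfl, rfl, rfl⟩ | ⟨rfl, rfl, rfl⟩ <;> tauto
  · simp only [List.pairwise_cons, List.mem_cons, List.not_mem_nil,
      List.sum_cons, List.sum_nil] at hsort hsum
    have h1 := hpos a (by simp)
    have h2 := hpos b (by simp)
    have h3 := hpos c (by simp)
    have h4 := hpos d (by simp)
    have hba : b ≤ a := by have := hsort.1 b; simp at this; omega
    have hcb : c ≤ b := by have := hsort.2.1 c; simp at this; omega
    have hdc : d ≤ c := by have := hsort.2.2.1 d; simp at this; omega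
    have : a = 2 ∧ b = 1 ∧ c = 1 ∧ d = 1 := by omega
    obtain ⟨rfl, rfl, rfl, rfl⟩ := this
    tauto
  · have hrest : rest = [] := by
      have hlr : ((5 + rest.length : Nat) : Int) ≤ 5 := by
        simpa [List.length_cons, Nat.add_comm, Nat.add_assoc, Nat.add_left_comm] using hlen5
      have : rest.length = 0 := by omega
      exact List.length_eq_zero_iff.mp this
    subst hrest
    simp only [List.pairwise_cons, List.mem_cons, List.not_mem_nil,
      List.sum_cons, List.sum_nil] at hsort hsum
    have h1 := hpos a (by simp)
    have h2 := hpos b (by simp)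
    have h3 := hpos c (by simp)
    have h4 := hpos d (by simp)
    have h5 := hpos e (by simp)
    have hba : b ≤ a := by have := hsort.1 b; simp at this; omega
    have hcb : c ≤ b := by have := hsort.2.1 c; simp at this; omega
    have hdc : d ≤ c := by have := hsort.2.2.1 d; simp at this; omega
    have hed : e ≤ d := by have := hsort.2.2.2.1 e; simp at this; omega
    have : a = 1 ∧ b = 1 ∧ c = 1 ∧ d = 1 ∧ e = 1 := by omega
    obtain ⟨rfl, rfl, rfl, rfl, rfl⟩ := this
    tauto

theorem exists5 {α : Type} (l : List α) (h : l.length = 5) :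
    ∃ a b c d e, l = [a, b, c, d, e] := by
  rcases l with _ | ⟨a, _ | ⟨b, _ | ⟨c, _ | ⟨d, _ | ⟨e, r⟩⟩⟩⟩⟩
  · simp at h
  · simp at h
  · simp at h
  · simp at h
  · simp at h
  · have hr : r = [] := by
      have : r.length = 0 := by simpa using h
      exact List.length_eq_zero_iff.mp this
    exact ⟨a, b, c, d, e, by simp [hr]⟩

theorem straight_eq (v0 v1 v2 v3 v4 : Int) (h01 : v0 ≤ v1) (h12 : v1 ≤ v2) (h23 : v2 ≤ v3)
    (h34 : v3 ≤ v4) :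
    ((PySem.List.pyRange 0 4 1).foldl (fun straight i =>
        if PySem.List.pyGetD [v0, v1, v2, v3, v4] i 0
            ≠ PySem.List.pyGetD [v0, v1, v2, v3, v4] (i + 1) 0 - 1 then false
        else straight) true)
    = ((PySem.List.pyGetD [v0, v1, v2, v3, v4] 4 0 - PySem.List.pyGetD [v0, v1, v2, v3, v4] 0 0 == 4)
        && ((PySem.Set.ofList [v0, v1, v2, v3, v4]).length == 5)) := by
  have hr : PySem.List.pyRange 0 4 1 = [0, 1, 2, 3] := by decide
  rw [hr, Bool.eq_iff_iff]
  simp only [PySem.Set.ofList_eq_foldl, List.foldl, PySem.Set.add_eq_ite,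
    Bool.and_eq_true, beq_iff_eq]
  norm_num [PySem.List.pyGetD, PySem.List.pyIdx?]
  split_ifs <;> simp_all [List.mem_cons] <;> omega

-- min/max of a list that is a permutation of a sorted 5-list
theorem min_max_five (l : List Int) (v0 v1 v2 v3 v4 : Int)
    (hperm : ([v0, v1, v2, v3, v4] : List Int).Perm l)
    (h01 : v0 ≤ v1) (h12 : v1 ≤ v2) (h23 : v2 ≤ v3) (h34 : v3 ≤ v4) :
    PySem.List.min? l (fun x => x) = some v0 ∧ PySem.List.max? l (fun x => x) = some v4 := by
  have hne : l ≠ [] := by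
    intro h
    subst h
    simpa using hperm.length_eq
  have hv0 : v0 ∈ l := hperm.mem_iff.mp (by simp)
  have hv4 : v4 ∈ l := hperm.mem_iff.mp (by simp)
  have hub : ∀ y ∈ l, v0 ≤ y ∧ y ≤ v4 := by
    intro y hy
    have : y ∈ ([v0, v1, v2, v3, v4] : List Int) := hperm.mem_iff.mpr hy
    simp only [List.mem_cons, List.not_mem_nil, or_false] at this
    rcases this with rfl | rfl | rfl | rfl | rfl <;> omega
  constructor
  · cases hmin : PySem.List.min? l (fun x => x) with
    | none => exact absurd ((PySem.List.min?_eq_none_iff l _).mp hmin) hne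
    | some m =>
      have hm := PySem.List.min?_mem hmin
      have h1 := PySem.List.min?_isMin hmin v0 hv0
      have h2 := (hub m hm).1
      simp only [Option.some.injEq]
      omega
  · cases hmax : PySem.List.max? l (fun x => x) with
    | none => exact absurd ((PySem.List.max?_eq_none_iff l _).mp hmax) hne
    | some m =>
      have hm := PySem.List.max?_mem hmax
      have h1 := PySem.List.max?_isMax hmax v4 hv4
      have h2 := (hub m hm).2
      simp only [Option.some.injEq]
      omega

-- the pairwise-equal-pairs counter of B, as a structural recursion
def pvPC : List Int → Nat
  | [] => 0
  | x :: t => t.countP (fun y => x == y) + pvPC t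

theorem pvPC_cons_count (x : Int) (t : List Int) : pvPC (x :: t) = t.count x + pvPC t := by
  have : t.countP (fun y => x == y) = t.count x := by
    rw [List.count_eq_countP]
    refine List.countP_congr (fun y _ => ?_)
    by_cases h : x = y
    · subst h; rfl
    · simp [h, Ne.symm h]
  simp [pvPC, this]

theorem pvPC_eq_sum (l : List Int) :
    pvPC l = ∑ w ∈ l.toFinset, Nat.choose (l.count w) 2 := by
  induction l with
  | nil => simp [pvPC]
  | cons x t ih =>
    rw [pvPC_cons_count, ih, List.toFinset_cons]
    by_cases hx : x ∈ t.toFinset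
    · rw [Finset.insert_eq_self.mpr hx]
      have hpt : ∀ w ∈ t.toFinset, Nat.choose ((x :: t).count w) 2
          = Nat.choose (t.count w) 2 + (if w = x then t.count x else 0) := by
        intro w hw
        rw [List.count_cons]
        by_cases hwx : w = x
        · subst hwx
          simp [Nat.choose_succ_succ, Nat.add_comm]
        · simp [Ne.symm hwx, hwx]
      rw [Finset.sum_congr rfl hpt, Finset.sum_add_distrib, Finset.sum_ite_eq' t.toFinset x]
      simp [hx]
      exact Nat.add_comm _ _
    · have hcx : t.count x = 0 := by
        rw [List.count_eq_zero]
        simpa using hx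
      rw [Finset.sum_insert hx]
      have hfx : Nat.choose ((x :: t).count x) 2 = 0 := by
        rw [List.count_cons, hcx]
        simp
      have hpt : ∀ w ∈ t.toFinset, Nat.choose ((x :: t).count w) 2 = Nat.choose (t.count w) 2 := by
        intro w hw
        rw [List.count_cons]
        have hne : w ≠ x := by rintro rfl; exact hx hw
        simp [Ne.symm hne]
      rw [hfx, Finset.sum_congr rfl hpt, hcx]

theorem pvPC_perm (l l' : List Int) (h : l.Perm l') : pvPC l = pvPC l' := by
  have hts : l.toFinset = l'.toFinset := by
    ext a
    simp [List.mem_toFinset, h.mem_iff]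
  rw [pvPC_eq_sum, pvPC_eq_sum, hts]
  exact Finset.sum_congr rfl (fun w _ => by rw [h.count_eq])

theorem pvPC_eq_ofList_sum (l : List Int) :
    pvPC l = ((PySem.Set.ofList l).map (fun w => Nat.choose (l.count w) 2)).sum := by
  rw [pvPC_eq_sum, ← List.sum_toFinset _ (PySem.Set.nodup_ofList l)]
  have hts : (PySem.Set.ofList l).toFinset = l.toFinset := by
    ext a
    simp [List.mem_toFinset, PySem.Set.mem_ofList]
  rw [hts]

set_option maxHeartbeats 4000000 in
theorem pfold_eq_pvPC (l : List Int) (h : l.length = 5) :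
    (PySem.List.pyRange 0 5 1).foldl (fun p i =>
      (PySem.List.pyRange (i + 1) 5 1).foldl (fun p j =>
        if PySem.List.pyGetD l i 0 == PySem.List.pyGetD l j 0 then p + 1 else p) p) (0 : Int)
    = (pvPC l : Int) := by
  obtain ⟨a, b, c, d, e, rfl⟩ := exists5 l h
  have h1 : PySem.List.pyRange 0 5 1 = [0, 1, 2, 3, 4] := by decide
  have h2 : PySem.List.pyRange (0 + 1) 5 1 = [1, 2, 3, 4] := by decide
  have h3 : PySem.List.pyRange (1 + 1) 5 1 = [2, 3, 4] := by decide
  have h4 : PySem.List.pyRange (2 + 1) 5 1 = [3, 4] := by decide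
  have h5 : PySem.List.pyRange (3 + 1) 5 1 = [4] := by decide
  have h6 : PySem.List.pyRange (4 + 1) 5 1 = [] := by decide
  simp only [h1, List.foldl_cons, List.foldl_nil, h2, h3, h4, h5, h6]
  have g0 : PySem.List.pyGetD [a, b, c, d, e] (0 : Int) 0 = a := by
    simp [PySem.List.pyGetD]
  have g1 : PySem.List.pyGetD [a, b, c, d, e] (1 : Int) 0 = b := by
    simp [PySem.List.pyGetD]
  have g2 : PySem.List.pyGetD [a, b, c, d, e] (2 : Int) 0 = c := by
    simp [PySem.List.pyGetD]
  have g3 : PySem.List.pyGetD [a, b, c, d, e] (3 : Int) 0 = d := by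
    simp [PySem.List.pyGetD]
  have g4 : PySem.List.pyGetD [a, b, c, d, e] (4 : Int) 0 = e := by
    simp [PySem.List.pyGetD]
  simp only [g0, g1, g2, g3, g4, pvPC, List.countP_cons, List.countP_nil]
  simp only [show ∀ (p : Int) (q : Bool), (if q = true then p + 1 else p)
      = p + (if q = true then (1 : Int) else 0) from fun p q => by cases q <;> simp]
  push_cast [apply_ite (fun n : Nat => (n : Int))]
  ring

theorem contains_eq_decide_mem (X : List Int) (k : Int) : (X.contains k) = decide (k ∈ X) := by
  by_cases h : k ∈ X <;> simp [h]

-- ===== VERDICT (by name: the statement is the Claim_ definition above) =====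
set_option maxHeartbeats 4000000 in
theorem poker_hands_spec : Claim_equal_poker_hands := by
  intro cards _hdom hpre
  unfold Pre_poker_hands at hpre
  unfold Spec_poker_hands
  simp only [poker_hands, poker_hands_alt]
  simp only [show (fun card => PySem.Int.mod card 13) = getValue from rfl,
    show (fun card => PySem.Int.floordiv card 13) = getColor from rfl]
  have hslen : (PySem.List.sorted cards (fun x => x)).length = 5 := by
    rw [PySem.List.length_sorted]; exact hpre
  have hspw := PySem.List.sorted_pairwise cards (fun x => x)
  set s := PySem.List.sorted cards (fun x => x) with hs
  have hsperm : s.Perm cards := PySem.List.sorted_perm _ _ _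
  -- values
  have hLlen : (s.map (fun card => getValue card)).length = 5 := by simp [hslen]
  set L := s.map (fun card => getValue card) with hLdef
  have hLperm : L.Perm (cards.map (fun card => getValue card)) := hsperm.map _
  have hvslen : (PySem.List.sorted L (fun x => x)).length = 5 := by
    rw [PySem.List.length_sorted]; exact hLlen
  have hvsperm : (PySem.List.sorted L (fun x => x)).Perm L := PySem.List.sorted_perm _ _ _
  have hvspw := PySem.List.sorted_pairwise L (fun x => x)
  set vs := PySem.List.sorted L (fun x => x) with hvsdef
  have hbounds : ∀ x ∈ L, 0 ≤ x ∧ x < 13 := by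
    intro x hx
    obtain ⟨c, _, rfl⟩ := List.mem_map.mp hx
    exact getValue_bounds c
  -- the 13-slot counter becomes per-rank counts of L
  rw [value_counter_eq s, ← hLdef]
  -- colors (A side, sorted)
  have hclen : (PySem.List.sorted (s.map (fun card => getColor card)) (fun x => x)).length = 5 := by
    rw [PySem.List.length_sorted]; simp [hslen]
  have hcperm : (PySem.List.sorted (s.map (fun card => getColor card)) (fun x => x)).Perm
      (s.map (fun card => getColor card)) := PySem.List.sorted_perm _ _ _
  have hcpw := PySem.List.sorted_pairwise (s.map (fun card => getColor card)) (fun x => x)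
  set sc := PySem.List.sorted (s.map (fun card => getColor card)) (fun x => x) with hscdef
  -- destructure the three sorted 5-lists
  obtain ⟨c0, c1, c2, c3, c4, hsc5⟩ := exists5 sc hclen
  obtain ⟨v0, v1, v2, v3, v4, hvs5⟩ := exists5 vs hvslen
  obtain ⟨s0, s1, s2, s3, s4, hss5⟩ := exists5 s hslen
  rw [hsc5] at hcpw
  rw [hvs5] at hvspw
  rw [hss5] at hspw
  simp only [List.pairwise_cons, List.mem_cons, List.not_mem_nil, or_false] at hcpw hvspw hspw
  have hc01 : c0 ≤ c1 := by have := hcpw.1 c1; simp at this; omega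
  have hc12 : c1 ≤ c2 := by have := hcpw.2.1 c2; simp at this; omega
  have hc23 : c2 ≤ c3 := by have := hcpw.2.2.1 c3; simp at this; omega
  have hc34 : c3 ≤ c4 := by have := hcpw.2.2.2.1 c4; simp at this; omega
  have hv01 : v0 ≤ v1 := by have := hvspw.1 v1; simp at this; omega
  have hv12 : v1 ≤ v2 := by have := hvspw.2.1 v2; simp at this; omega
  have hv23 : v2 ≤ v3 := by have := hvspw.2.2.1 v3; simp at this; omega
  have hv34 : v3 ≤ v4 := by have := hvspw.2.2.2.1 v4; simp at this; omega
  have hs01 : s0 ≤ s1 := by have := hspw.1 s1; simp at this; omega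
  have hs12 : s1 ≤ s2 := by have := hspw.2.1 s2; simp at this; omega
  have hs23 : s2 ≤ s3 := by have := hspw.2.2.1 s3; simp at this; omega
  have hs34 : s3 ≤ s4 := by have := hspw.2.2.2.1 s4; simp at this; omega
  -- min/max of B's lists
  have hmmcol := min_max_five (cards.map (fun card => getColor card)) c0 c1 c2 c3 c4
    (by rw [← hsc5]; exact hcperm.trans (hsperm.map _)) hc01 hc12 hc23 hc34
  have hmmval := min_max_five (cards.map (fun card => getValue card)) v0 v1 v2 v3 v4
    (by rw [← hvs5]; exact hvsperm.trans hLperm) hv01 hv12 hv23 hv34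
  have hmmcards := min_max_five cards s0 s1 s2 s3 s4 (by rw [← hss5]; exact hsperm)
    hs01 hs12 hs23 hs34
  -- B's pair counter
  rw [pfold_eq_pvPC (cards.map (fun card => getValue card)) (by simp [hpre])]
  rw [pvPC_perm (cards.map (fun card => getValue card)) vs (hLperm.symm.trans hvsperm.symm)]
  -- the count signature
  set occ := (PySem.Set.ofList vs).map (fun w => ((vs.count w : Nat) : Int)) with hocc
  have hsigperm : (PySem.List.sorted occ (fun x => x) true).Perm occ := PySem.List.sorted_perm _ _ _
  have hsigsort : (PySem.List.sorted occ (fun x => x) true).Pairwise (fun a b => b ≤ a) :=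
    PySem.List.sorted_pairwise_rev occ (fun x => x)
  set sig := PySem.List.sorted occ (fun x => x) true with hsig
  have hpos : ∀ x ∈ sig, 1 ≤ x := by
    intro x hx
    obtain ⟨w, hw, rfl⟩ := List.mem_map.mp (hsigperm.mem_iff.mp hx)
    have : 0 < vs.count w := List.count_pos_iff.mpr ((PySem.Set.mem_ofList _ _).mp hw)
    omega
  have hsum : sig.sum = 5 := by
    rw [hsigperm.sum_eq, hocc, sum_ofList_count, hvsdef, PySem.List.length_sorted, hLlen]
    norm_num
  -- B's pair count via the signature
  have hpcsig : ((pvPC vs : Nat) : Int)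
      = (((sig.map (fun n : Int => Nat.choose n.toNat 2)).sum : Nat) : Int) := by
    have h1 : occ.map (fun n : Int => Nat.choose n.toNat 2)
        = (PySem.Set.ofList vs).map (fun w => Nat.choose (vs.count w) 2) := by
      rw [hocc, List.map_map]
      exact List.map_congr_left (fun w _ => by simp)
    rw [pvPC_eq_ofList_sum vs, ← h1, (hsigperm.map (fun n : Int => Nat.choose n.toNat 2)).sum_eq]
  rw [hpcsig]
  -- A's flags via the signature
  have hofperm : (PySem.Set.ofList vs).Perm (PySem.Set.ofList L) := by
    refine (List.perm_ext_iff_of_nodup (PySem.Set.nodup_ofList vs) (PySem.Set.nodup_ofList L)).mpr ?_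
    intro x
    rw [PySem.Set.mem_ofList, PySem.Set.mem_ofList]
    exact hvsperm.mem_iff
  have hoccperm : occ.Perm ((PySem.Set.ofList L).map (fun w => ((L.count w : Nat) : Int))) := by
    rw [hocc]
    have h1 : (PySem.Set.ofList vs).map (fun w => ((vs.count w : Nat) : Int))
        = (PySem.Set.ofList vs).map (fun w => ((L.count w : Nat) : Int)) :=
      List.map_congr_left (fun w _ => by rw [hvsperm.count_eq])
    rw [h1]
    exact hofperm.map _
  have hmemflag : ∀ k : Int, k ≠ 0 →
      ((k ∈ (List.range 13).map (fun j => ((L.count ((j : Nat) : Int) : Nat) : Int))) ↔ k ∈ sig) := by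
    intro k hk
    rw [mem_rangecount_iff L hbounds k hk, hsigperm.mem_iff, hoccperm.mem_iff, List.mem_map]
    constructor
    · rintro ⟨w, hw, hc⟩
      exact ⟨w, (PySem.Set.mem_ofList _ _).mpr hw, hc⟩
    · rintro ⟨w, hw, hc⟩
      exact ⟨w, (PySem.Set.mem_ofList _ _).mp hw, hc⟩
  have hcountflag : ((List.range 13).map (fun j => ((L.count ((j : Nat) : Int) : Nat) : Int))).count 2
      = sig.count 2 := by
    rw [count_rangecount L hbounds 2 (by norm_num), hsigperm.count_eq, hoccperm.count_eq]
  rw [PySem.List.count_eq, hcountflag]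
  have hc4 : ((List.range 13).map (fun j => ((L.count ((j : Nat) : Int) : Nat) : Int))).contains (4 : Int)
      = decide ((4 : Int) ∈ sig) := by
    rw [contains_eq_decide_mem]; exact decide_eq_decide.mpr (hmemflag 4 (by norm_num))
  have hc3 : ((List.range 13).map (fun j => ((L.count ((j : Nat) : Int) : Nat) : Int))).contains (3 : Int)
      = decide ((3 : Int) ∈ sig) := by
    rw [contains_eq_decide_mem]; exact decide_eq_decide.mpr (hmemflag 3 (by norm_num))
  have hc2 : ((List.range 13).map (fun j => ((L.count ((j : Nat) : Int) : Nat) : Int))).contains (2 : Int)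
      = decide ((2 : Int) ∈ sig) := by
    rw [contains_eq_decide_mem]; exact decide_eq_decide.mpr (hmemflag 2 (by norm_num))
  rw [hc4, hc3, hc2]
  -- A's straight fold and flush/royal indexings
  rw [hvs5, straight_eq v0 v1 v2 v3 v4 hv01 hv12 hv23 hv34]
  have hsetlen : (PySem.Set.ofList [v0, v1, v2, v3, v4]).length = sig.length := by
    rw [← hvs5, hsigperm.length_eq, hocc, List.length_map]
  rw [hsetlen, hsc5, hss5]
  -- evaluate the literal indexings and B's min/max
  rw [hmmcol.1, hmmcol.2, hmmval.1, hmmval.2, hmmcards.1]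
  simp only [PySem.List.pyGetD_zero_cons, Option.getD_some,
    show ∀ x y : Int, ((some x == some y) : Bool) = (x == y) from fun x y => rfl,
    show ∀ (a b c d e : Int) (z : Int),
        PySem.List.pyGetD [a, b, c, d, e] (4 : Int) z = e from fun a b c d e z => by
      simp [PySem.List.pyGetD]]
  -- case analysis over the seven count signatures
  have hpart := partition5 sig hsigsort hpos hsum
  clear_value sig
  clear hsig hsigsort hsigperm hpos hsum hcountflag hmemflag hc4 hc3 hc2 hoccperm hofperm
  clear hocc
  clear occ
  rcases hpart with rfl | rfl | rfl | rfl | rfl | rfl | rfl <;>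
    norm_num [show ((5 : Int).toNat) = 5 from rfl, show ((4 : Int).toNat) = 4 from rfl,
      show ((3 : Int).toNat) = 3 from rfl, show ((2 : Int).toNat) = 2 from rfl,
      show ((1 : Int).toNat) = 1 from rfl,
      show Nat.choose 5 2 = 10 from rfl, show Nat.choose 4 2 = 6 from rfl,
      show Nat.choose 3 2 = 3 from rfl, show Nat.choose 2 2 = 1 from rfl,
      show Nat.choose 1 2 = 0 from rfl,
      PySem.Dict.getD, PySem.Dict.get?, PySem.Dict.ofList] <;>
    first
      | decide
      | (split_ifs <;> first | rfl | decide | simp_all)
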